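-- pv_equiv track=rewrite | github.com/MrBrantCode/unitest_baseline | mut_generate/mist_train_taco/taco_13969/solution.py | reconstruct_matrix_A
-- ===== SOURCE A (Python) =====
-- def reconstruct_matrix_A(X, Y, Z, B):
--     """
--     Reconstructs the original matrix A from the given matrix B.
--
--     Parameters:
--     X (int): The number of rows in the matrix A.
--     Y (int): The number of columns in the matrix A.
--     Z (int): The number of depth slices in the matrix A.
--     B (list of list of list): The 3D matrix B from which to reconstruct A.
--
--     Returns:
--     list of list of list: The reconstructed 3D matrix A.
--     """
--     A = [[[0 for _ in range(Z)] for _ in range(Y)] for _ in range(X)]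
--
--     for x in range(X):
--         for y in range(Y):
--             for z in range(Z):
--                 result = B[x][y][z]
--                 if x > 0:
--                     result -= B[x - 1][y][z]
--                     if y > 0:
--                         result += B[x - 1][y - 1][z]
--                         if z > 0:
--                             result -= B[x - 1][y - 1][z - 1]
--                 if y > 0:
--                     result -= B[x][y - 1][z]
--                     if z > 0:
--                         result += B[x][y - 1][z - 1]
--                 if z > 0:
--                     result -= B[x][y][z - 1]
--                     if x > 0:
--                         result += B[x - 1][y][z - 1]
--                 A[x][y][z] = result
--
--     return A
-- ===== SOURCE B (Python) =====
-- def _adjdiff(l, sub):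
--     # adjacent difference along the first axis: keep element 0, replace l[i] by sub(l[i], l[i-1])
--     return l[:1] + [sub(c, p) for c, p in zip(l[1:], l)]
--
-- def reconstruct_matrix_A(X, Y, Z, B):
--     A = [[[B[x][y][z] for z in range(Z)] for y in range(Y)] for x in range(X)]
--     A = _adjdiff(A, lambda c, p: [[ce - pe for ce, pe in zip(cr, pr)] for cr, pr in zip(c, p)])
--     A = [_adjdiff(p, lambda c, q: [ce - qe for ce, qe in zip(c, q)]) for p in A]
--     return [[_adjdiff(r, lambda c, q: c - q) for r in p] for p in A]
-- ===== Notes on version B (the rewrite author's own statement) =====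
-- stated objective: alternative
-- what changed: A inverts the 3D prefix sum cell-by-cell with a single pass of 8-term inclusion-exclusion; B first deep-copies the relevant X*Y*Z block of B and then applies three separable adjacent-difference passes, one per axis.
import Mathlib
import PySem

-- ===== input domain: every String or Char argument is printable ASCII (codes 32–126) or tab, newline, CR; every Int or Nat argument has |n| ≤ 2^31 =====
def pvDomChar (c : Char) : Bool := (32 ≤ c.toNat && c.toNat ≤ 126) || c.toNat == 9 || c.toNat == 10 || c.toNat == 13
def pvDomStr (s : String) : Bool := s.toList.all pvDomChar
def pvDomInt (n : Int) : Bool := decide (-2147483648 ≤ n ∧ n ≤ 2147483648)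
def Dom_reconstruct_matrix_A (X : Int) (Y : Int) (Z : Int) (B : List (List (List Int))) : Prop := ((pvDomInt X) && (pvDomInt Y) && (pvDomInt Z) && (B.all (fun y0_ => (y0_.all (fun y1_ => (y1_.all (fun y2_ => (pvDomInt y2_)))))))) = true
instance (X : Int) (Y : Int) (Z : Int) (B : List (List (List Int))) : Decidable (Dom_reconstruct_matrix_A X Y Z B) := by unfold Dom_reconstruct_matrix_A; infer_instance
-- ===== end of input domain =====

-- B replaces A's single-pass 8-term inclusion-exclusion with a deep copy followed by three
-- separable adjacent-difference passes (one per axis): an alternative decomposition, same cost.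


-- ===== PORT A =====
-- B[a][b][c]; indices produced by range are nonnegative and Pre_ keeps them in range,
-- so the default of pyGetD is never consulted on admitted inputs.
def pvGet3 (B : List (List (List Int))) (a b c : Int) : Int :=
  PySem.List.pyGetD (PySem.List.pyGetD (PySem.List.pyGetD B a []) b []) c 0

-- the body of A's innermost loop: `result`, with the branches in A's order
def pvCellA (B : List (List (List Int))) (x y z : Int) : Int :=
  let result := pvGet3 B x y z
  let result :=
    if x > 0 then
      let r := result - pvGet3 B (x - 1) y z
      if y > 0 then
        let r := r + pvGet3 B (x - 1) (y - 1) z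
        if z > 0 then r - pvGet3 B (x - 1) (y - 1) (z - 1) else r
      else r
    else result
  let result :=
    if y > 0 then
      let r := result - pvGet3 B x (y - 1) z
      if z > 0 then r + pvGet3 B x (y - 1) (z - 1) else r
    else result
  if z > 0 then
    let r := result - pvGet3 B x y (z - 1)
    if x > 0 then r + pvGet3 B (x - 1) y (z - 1) else r
  else result

-- A allocates a zero matrix and then overwrites every cell A[x][y][z] exactly once with
-- `result`; the triple assignment loop is ported as maps over the same three ranges.
def reconstruct_matrix_A (X : Int) (Y : Int) (Z : Int) (B : List (List (List Int))) : List (List (List Int)) :=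
  (PySem.List.pyRange 0 X 1).map (fun x =>
    (PySem.List.pyRange 0 Y 1).map (fun y =>
      (PySem.List.pyRange 0 Z 1).map (fun z => pvCellA B x y z)))

-- ===== PORT B =====
-- _adjdiff(l, sub) = l[:1] + [sub(c, p) for c, p in zip(l[1:], l)]
def pvAdjDiff {α : Type} (sub : α → α → α) (l : List α) : List α :=
  match l with
  | [] => []
  | h :: t => h :: List.zipWith sub t (h :: t)

def reconstruct_matrix_A_alt (X : Int) (Y : Int) (Z : Int) (B : List (List (List Int))) : List (List (List Int)) :=
  let A0 := (PySem.List.pyRange 0 X 1).map (fun x =>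
    (PySem.List.pyRange 0 Y 1).map (fun y =>
      (PySem.List.pyRange 0 Z 1).map (fun z => pvGet3 B x y z)))
  let A1 := pvAdjDiff (fun c p => List.zipWith (fun cr pr => List.zipWith (fun ce pe => ce - pe) cr pr) c p) A0
  let A2 := A1.map (fun p => pvAdjDiff (fun c q => List.zipWith (fun ce qe => ce - qe) c q) p)
  A2.map (fun p => p.map (pvAdjDiff (fun c q => c - q)))

-- ===== PRECONDITION & SPEC =====
-- Pre_ excludes exactly the inputs on which the Python A raises IndexError: when all three
-- dimensions are positive, B must provide at least X planes of at least Y rows of at least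
-- Z entries (otherwise no element of B is read and A returns normally).
def Pre_reconstruct_matrix_A (X : Int) (Y : Int) (Z : Int) (B : List (List (List Int))) : Prop :=
  0 < X → 0 < Y → 0 < Z →
    (X.toNat ≤ B.length ∧ ∀ p ∈ B.take X.toNat,
      Y.toNat ≤ p.length ∧ ∀ r ∈ p.take Y.toNat, Z.toNat ≤ r.length)
instance (X : Int) (Y : Int) (Z : Int) (B : List (List (List Int))) : Decidable (Pre_reconstruct_matrix_A X Y Z B) := by unfold Pre_reconstruct_matrix_A; infer_instance

def pvWitness_reconstruct_matrix_A : Int × Int × Int × List (List (List Int)) := (1, 1, 2, [[[3, 5]]])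

def Spec_reconstruct_matrix_A (X : Int) (Y : Int) (Z : Int) (B : List (List (List Int))) (out : List (List (List Int))) : Prop := out = reconstruct_matrix_A_alt X Y Z B
instance (X : Int) (Y : Int) (Z : Int) (B : List (List (List Int))) (out : List (List (List Int))) : Decidable (Spec_reconstruct_matrix_A X Y Z B out) := by unfold Spec_reconstruct_matrix_A; infer_instance

-- ===== CLAIM (what is proved, stated in full; the proofs are below) =====
def Claim_equal_reconstruct_matrix_A : Prop := ∀ (X : Int) (Y : Int) (Z : Int) (B : List (List (List Int))), Dom_reconstruct_matrix_A X Y Z B → Pre_reconstruct_matrix_A X Y Z B → Spec_reconstruct_matrix_A X Y Z B (reconstruct_matrix_A X Y Z B)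

-- ===== LEMMAS AND PROOFS =====

-- proof-side cell formulas: value of a cell after each differencing pass
def pvG (B : List (List (List Int))) (i j l : Nat) : Int := pvGet3 B (Int.ofNat i) (Int.ofNat j) (Int.ofNat l)
def pvC1 (B : List (List (List Int))) (i j l : Nat) : Int :=
  if i = 0 then pvG B i j l else pvG B i j l - pvG B (i - 1) j l
def pvC2 (B : List (List (List Int))) (i j l : Nat) : Int :=
  if j = 0 then pvC1 B i j l else pvC1 B i j l - pvC1 B i (j - 1) l
def pvC3 (B : List (List (List Int))) (i j l : Nat) : Int :=
  if l = 0 then pvC2 B i j l else pvC2 B i j l - pvC2 B i j (l - 1)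

theorem pvAdjDiff_length {α : Type} (sub : α → α → α) (l : List α) :
    (pvAdjDiff sub l).length = l.length := by
  cases l with
  | nil => rfl
  | cons h t => simp [pvAdjDiff]

theorem pvAdjDiff_getElem {α : Type} (sub : α → α → α) (l : List α) (i : Nat)
    (h : i < l.length) :
    (pvAdjDiff sub l)[i]'(by rw [pvAdjDiff_length]; exact h) =
      if i = 0 then l[i] else sub (l[i]) (l[i - 1]'(by omega)) := by
  cases l with
  | nil => simp at h
  | cons hd t =>
    cases i with
    | zero => simp [pvAdjDiff]
    | succ j => simp [pvAdjDiff]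
      

theorem zipWith_map_same {α β : Type} (f : β → β → β) (g h : α → β) (l : List α) :
    List.zipWith f (l.map g) (l.map h) = l.map (fun a => f (g a) (h a)) := by
  induction l with
  | nil => rfl
  | cons a t ih => simp [ih]

theorem pvAdjDiff_map_range {β : Type} (sub : β → β → β) (f : Nat → β) (n : Nat) :
    pvAdjDiff sub ((List.range n).map f) =
      (List.range n).map (fun i => if i = 0 then f i else sub (f i) (f (i - 1))) := by
  apply List.ext_getElem
  · simp [pvAdjDiff_length]
  · intro i h1 h2
    rw [pvAdjDiff_getElem]
    · rw [List.getElem_map, List.getElem_range]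
      split <;> simp_all
    · simpa using h2

theorem map_pyRange_zero {α : Type} (f : Int → α) (X : Int) :
    (PySem.List.pyRange 0 X 1).map f = (List.range X.toNat).map (fun k => f (Int.ofNat k)) := by
  rw [PySem.List.pyRange_one, List.map_map]
  simp only [Int.sub_zero]
  refine List.map_congr_left (fun k _ => ?_)
  simp [Int.ofNat_eq_natCast]

theorem cell_eq (B : List (List (List Int))) (i j l : Nat) :
    pvCellA B (Int.ofNat i) (Int.ofNat j) (Int.ofNat l) = pvC3 B i j l := by
  cases i <;> cases j <;> cases l <;>
    simp [pvCellA, pvC1, pvC2, pvC3, pvG, Nat.cast_succ] <;> ring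

theorem pass_x (n m kk : Nat) (c : Nat → Nat → Nat → Int) :
    pvAdjDiff (fun c' p => List.zipWith (fun cr pr => List.zipWith (fun ce pe => ce - pe) cr pr) c' p)
      ((List.range n).map (fun i => (List.range m).map (fun j => (List.range kk).map (fun l => c i j l))))
    = (List.range n).map (fun i => (List.range m).map (fun j => (List.range kk).map (fun l =>
        if i = 0 then c i j l else c i j l - c (i - 1) j l))) := by
  rw [pvAdjDiff_map_range]
  refine List.map_congr_left (fun i _ => ?_)
  by_cases h : i = 0
  · simp [h]
  · simp only [h, if_false, zipWith_map_same]

theorem pass_y (n m kk : Nat) (c : Nat → Nat → Nat → Int) :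
    ((List.range n).map (fun i => (List.range m).map (fun j => (List.range kk).map (fun l => c i j l)))).map
      (fun p => pvAdjDiff (fun c' q => List.zipWith (fun ce qe => ce - qe) c' q) p)
    = (List.range n).map (fun i => (List.range m).map (fun j => (List.range kk).map (fun l =>
        if j = 0 then c i j l else c i j l - c i (j - 1) l))) := by
  rw [List.map_map]
  refine List.map_congr_left (fun i _ => ?_)
  show pvAdjDiff _ _ = _
  rw [pvAdjDiff_map_range]
  refine List.map_congr_left (fun j _ => ?_)
  by_cases h : j = 0
  · simp [h]
  · simp only [h, if_false, zipWith_map_same]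

theorem pass_z (n m kk : Nat) (c : Nat → Nat → Nat → Int) :
    ((List.range n).map (fun i => (List.range m).map (fun j => (List.range kk).map (fun l => c i j l)))).map
      (fun p => p.map (pvAdjDiff (fun c' q => c' - q)))
    = (List.range n).map (fun i => (List.range m).map (fun j => (List.range kk).map (fun l =>
        if l = 0 then c i j l else c i j l - c i j (l - 1)))) := by
  rw [List.map_map]
  refine List.map_congr_left (fun i _ => ?_)
  show List.map _ _ = _
  rw [List.map_map]
  refine List.map_congr_left (fun j _ => ?_)
  show pvAdjDiff _ _ = _
  rw [pvAdjDiff_map_range]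

theorem alt_eq (X Y Z : Int) (B : List (List (List Int))) :
    reconstruct_matrix_A_alt X Y Z B =
      (List.range X.toNat).map (fun i => (List.range Y.toNat).map (fun j =>
        (List.range Z.toNat).map (fun l => pvC3 B i j l))) := by
  unfold reconstruct_matrix_A_alt
  simp only [map_pyRange_zero]
  rw [pass_x X.toNat Y.toNat Z.toNat (fun i j l => pvGet3 B (Int.ofNat i) (Int.ofNat j) (Int.ofNat l))]
  rw [pass_y]
  rw [pass_z]
  simp only [pvC3, pvC2, pvC1, pvG]

theorem reconstruct_matrix_A_spec : Claim_equal_reconstruct_matrix_A := by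
  intro X Y Z B _ _
  unfold Spec_reconstruct_matrix_A
  rw [alt_eq]
  unfold reconstruct_matrix_A
  simp only [map_pyRange_zero, cell_eq]
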